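-- pv_equiv track=rewrite | github.com/sophiaalthammer/parm | analysis/compare_bm25_dpr.py | remove_query_from_ranked_list
-- ===== SOURCE A (Python) =====
-- def remove_query_from_ranked_list(dpr_dict):
--     # now remove the document itself from the list of candidates
--     dpr_dict2 = {}
--     for key, value in dpr_dict.items():
--         dpr_dict2.update({key: {}})
--         for key2, value2 in value.items():
--             if key != key2:
--                 dpr_dict2.get(key).update({key2: value2})
--     return dpr_dict2
-- ===== SOURCE B (Python) =====
-- def remove_query_from_ranked_list(dpr_dict):
--     # now remove the document itself from the list of candidates:
--     # locate the single self-entry by index and splice it out of the item list,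
--     # instead of filtering every entry one by one
--     dpr_dict2 = {}
--     for key, value in dpr_dict.items():
--         items = list(value.items())
--         if key in value:
--             i = list(value.keys()).index(key)
--             items = items[:i] + items[i + 1:]
--         dpr_dict2[key] = dict(items)
--     return dpr_dict2
-- ===== Notes on version B (the rewrite author's own statement) =====
-- stated objective: alternative
-- what changed: Instead of A's element-wise inner loop that conditionally inserts every non-self pair into a fresh dict, B locates the one self-entry by key index and splices it out of the item list with two slices (bulk copies), rebuilding the inner dict from the spliced list.
import Mathlib
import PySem

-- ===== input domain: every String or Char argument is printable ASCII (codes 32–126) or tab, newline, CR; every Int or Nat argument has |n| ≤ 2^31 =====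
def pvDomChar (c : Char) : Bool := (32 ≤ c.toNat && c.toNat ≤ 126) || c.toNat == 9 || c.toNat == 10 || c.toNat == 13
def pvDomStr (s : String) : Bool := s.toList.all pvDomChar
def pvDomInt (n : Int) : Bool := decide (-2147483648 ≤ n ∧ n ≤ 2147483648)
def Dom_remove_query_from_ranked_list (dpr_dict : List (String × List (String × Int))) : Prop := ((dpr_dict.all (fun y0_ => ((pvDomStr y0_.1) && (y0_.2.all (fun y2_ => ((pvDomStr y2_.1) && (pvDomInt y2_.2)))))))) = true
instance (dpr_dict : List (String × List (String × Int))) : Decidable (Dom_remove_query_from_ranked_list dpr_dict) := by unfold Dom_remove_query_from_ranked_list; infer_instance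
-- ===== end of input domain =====

-- B replaces A's element-wise inner filtering loop by locating the one self-entry's index
-- and splicing it out of the item list with two slices (objective: alternative).

-- ===== PORT A =====
-- A: for each (key, value): dpr_dict2.update({key: {}}); then for each (key2, value2) in value,
-- if key != key2, mutate the inner dict stored at key (dpr_dict2.get(key).update({key2: value2})
-- is ported as Dict.modify at key, which is exact since key was just inserted).
def remove_query_from_ranked_list (dpr_dict : List (String × List (String × Int))) : List (String × List (String × Int)) :=
  let d2 :=
    (PySem.Dict.ofList dpr_dict).items.foldl
      (fun d2 kv =>
        let d2 := d2.insert kv.1 (PySem.Dict.empty : PySem.Dict String Int)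
        (PySem.Dict.ofList kv.2).items.foldl
          (fun d2 kv2 =>
            if kv.1 ≠ kv2.1 then
              d2.modify kv.1 PySem.Dict.empty (fun m => m.insert kv2.1 kv2.2)
            else d2)
          d2)
      (PySem.Dict.empty : PySem.Dict String (PySem.Dict String Int))
  d2.items.map (fun p => (p.1, p.2.items))

-- ===== PORT B =====
-- B: items = list(value.items()); if key in value: i = list(value.keys()).index(key);
-- items = items[:i] + items[i+1:]; dpr_dict2[key] = dict(items).
-- (.index is guarded by 'key in value', so the none branch of index? is unreachable.)
def remove_query_from_ranked_list_alt (dpr_dict : List (String × List (String × Int))) : List (String × List (String × Int)) :=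
  let d2 :=
    (PySem.Dict.ofList dpr_dict).items.foldl
      (fun d2 kv =>
        let v := PySem.Dict.ofList kv.2
        let items := v.items
        let items2 :=
          if v.contains kv.1 then
            match PySem.List.index? v.keys kv.1 with
            | some i => PySem.List.slice items none (some (i : Int)) ++ PySem.List.slice items (some ((i : Int) + 1)) none
            | none => items
          else items
        d2.insert kv.1 (PySem.Dict.ofList items2))
      (PySem.Dict.empty : PySem.Dict String (PySem.Dict String Int))
  d2.items.map (fun p => (p.1, p.2.items))

-- ===== PRECONDITION & SPEC =====
def Spec_remove_query_from_ranked_list (dpr_dict : List (String × List (String × Int))) (out : List (String × List (String × Int))) : Prop := out = remove_query_from_ranked_list_alt dpr_dict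
instance (dpr_dict : List (String × List (String × Int))) (out : List (String × List (String × Int))) : Decidable (Spec_remove_query_from_ranked_list dpr_dict out) := by unfold Spec_remove_query_from_ranked_list; infer_instance

-- ===== CLAIM (what is proved, stated in full; the proofs are below) =====
def Claim_equal_remove_query_from_ranked_list : Prop := ∀ (dpr_dict : List (String × List (String × Int))), Dom_remove_query_from_ranked_list dpr_dict → Spec_remove_query_from_ranked_list dpr_dict (remove_query_from_ranked_list dpr_dict)

-- ===== LEMMAS AND PROOFS =====

-- A's inner loop, run from a state in which `key` was just bound to `m`, only rewrites the
-- entry at `key`: it equals binding `key` to the result of folding the inserts into `m` alone.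
theorem inner_loop_insert (l : List (String × Int)) (key : String)
    (d2 : PySem.Dict String (PySem.Dict String Int)) (m : PySem.Dict String Int) :
    l.foldl
      (fun d2 kv2 =>
        if key ≠ kv2.1 then
          d2.modify key PySem.Dict.empty (fun m => m.insert kv2.1 kv2.2)
        else d2)
      (d2.insert key m)
    = d2.insert key
        (l.foldl (fun m kv2 => if key ≠ kv2.1 then m.insert kv2.1 kv2.2 else m) m) := by
  induction l generalizing m with
  | nil => rfl
  | cons kv2 l ih =>
    simp only [List.foldl_cons]
    split_ifs with h
    · have hstep : (d2.insert key m).modify key PySem.Dict.empty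
          (fun m => m.insert kv2.1 kv2.2) = d2.insert key (m.insert kv2.1 kv2.2) := by
        simp only [PySem.Dict.modify, PySem.Dict.getD_insert_self, PySem.Dict.insert_insert_self]
      rw [hstep]; exact ih _
    · exact ih m

-- Folding the non-self entries of a unique-keyed inner dict into an empty dict
-- is exactly erasing the self-key from that dict.
theorem filter_fold_eq_erase (d : PySem.Dict String Int) (key : String)
    (hnd : d.keys.Nodup) :
    d.items.foldl (fun m kv2 => if key ≠ kv2.1 then m.insert kv2.1 kv2.2 else m)
      (PySem.Dict.empty : PySem.Dict String Int)
    = d.erase key := by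
  have hf : d.items.foldl (fun m kv2 => if key ≠ kv2.1 then m.insert kv2.1 kv2.2 else m)
      (PySem.Dict.empty : PySem.Dict String Int)
      = (d.items.filter (fun kv2 => key ≠ kv2.1)).foldl
          (fun m kv2 => m.insert kv2.1 kv2.2) PySem.Dict.empty := by
    rw [List.foldl_filter]
    simp only [decide_eq_true_eq]
  rw [hf]
  apply PySem.Dict.ext
  have h2 := PySem.Dict.items_foldl_insert_fresh
      (d.items.filter (fun kv2 => key ≠ kv2.1)) (fun a => a.1) (fun a => a.2)
      (PySem.Dict.empty : PySem.Dict String Int)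
      (fun a _ => rfl)
      (hnd.sublist (List.Sublist.map _ List.filter_sublist))
  beta_reduce at h2
  rw [h2]
  simp only [PySem.Dict.empty, List.nil_append, Prod.mk.eta, List.map_id', PySem.Dict.erase]
  apply List.filter_congr
  intro p _
  by_cases hp : p.1 = key
  · simp [hp]
  · have h1 : (p.1 == key) = false := beq_eq_false_iff_ne.mpr hp
    have h2 : decide (key = p.1) = false := decide_eq_false (fun h => hp h.symm)
    simp [h1, h2]

-- Rebuilding a dict from a key-unique pair list gives back exactly that list of items.
theorem ofList_of_nodup_fst (l : List (String × Int))
    (hnd : (l.map Prod.fst).Nodup) :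
    PySem.Dict.ofList l = PySem.Dict.mk l := by
  apply PySem.Dict.ext
  have h := PySem.Dict.items_foldl_insert_fresh l (fun a => a.1) (fun a => a.2)
      (PySem.Dict.empty : PySem.Dict String Int) (fun a _ => rfl) hnd
  beta_reduce at h
  simpa [PySem.Dict.ofList, PySem.Dict.update, PySem.Dict.empty, Prod.mk.eta] using h

-- Splicing out the entry whose key is `key` (located by index) equals filtering it out,
-- when the keys are unique.
theorem splice_eq_filter (items : List (String × Int)) (key : String)
    (hnd : (items.map Prod.fst).Nodup) :
    (match PySem.List.index? (items.map Prod.fst) key with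
     | some i => items.take i ++ items.drop (i + 1)
     | none => items)
    = items.filter (fun p => !(p.1 == key)) := by
  induction items with
  | nil => rfl
  | cons p rest ih =>
    simp only [List.map_cons, List.nodup_cons] at hnd
    by_cases hk : p.1 = key
    · subst hk
      simp only [List.map_cons]
      rw [PySem.List.index?_cons_self]
      simp only [List.take_zero, List.drop_succ_cons, List.drop_zero, List.nil_append,
        List.filter_cons, beq_self_eq_true, Bool.not_true]
      symm
      apply List.filter_eq_self.mpr
      intro q hq
      have : q.1 ≠ p.1 := by
        intro h; exact hnd.1 (h ▸ List.mem_map_of_mem hq)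
      simpa using this
    · simp only [List.map_cons]
      rw [PySem.List.index?_cons_of_ne (List.map Prod.fst rest) hk]
      have hfc : (p.1 == key) = false := beq_eq_false_iff_ne.mpr hk
      rcases hidx : PySem.List.index? (rest.map Prod.fst) key with _ | i
      · simp only [Option.map_none]
        rw [hidx] at ih
        simp only [List.filter_cons, hfc, Bool.not_false]
        rw [← ih hnd.2]
        simp
      · simp only [Option.map_some]
        rw [hidx] at ih
        simp only [List.take_succ_cons, List.drop_succ_cons, List.cons_append,
          List.filter_cons, hfc, Bool.not_false]
        rw [← ih hnd.2]
        simp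

-- B's per-key computation (contains-guard, index, two slices, dict rebuild) is erase.
theorem splice_eq_erase (v : PySem.Dict String Int) (key : String)
    (hnd : v.keys.Nodup) :
    PySem.Dict.ofList
      (if v.contains key then
        match PySem.List.index? v.keys key with
        | some i => PySem.List.slice v.items none (some (i : Int)) ++ PySem.List.slice v.items (some ((i : Int) + 1)) none
        | none => v.items
       else v.items)
    = v.erase key := by
  have hkeys : v.keys = v.items.map Prod.fst := rfl
  have hmain : (if v.contains key then
        match PySem.List.index? v.keys key with
        | some i => PySem.List.slice v.items none (some (i : Int)) ++ PySem.List.slice v.items (some ((i : Int) + 1)) none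
        | none => v.items
       else v.items) = v.items.filter (fun p => !(p.1 == key)) := by
    by_cases hc : v.contains key = true
    · rw [if_pos hc]
      have hmem : key ∈ v.keys := (PySem.Dict.contains_iff_mem_keys v key).mp hc
      rcases hidx : PySem.List.index? v.keys key with _ | i
      · exact absurd hmem ((PySem.List.index?_eq_none_iff v.keys key).mp hidx)
      · have hsl1 : PySem.List.slice v.items none (some (i : Int)) = v.items.take i := by
          rw [PySem.List.slice_to v.items (by positivity)]; simp
        have hsl2 : PySem.List.slice v.items (some ((i : Int) + 1)) none = v.items.drop (i + 1) := by
          rw [PySem.List.slice_from v.items (by positivity)]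
          congr 1
        have hf := splice_eq_filter v.items key (hkeys ▸ hnd)
        rw [hkeys] at hidx
        rw [hidx] at hf
        show PySem.List.slice v.items none (some (i : Int)) ++ PySem.List.slice v.items (some ((i : Int) + 1)) none = _
        rw [hsl1, hsl2]
        exact hf
    · rw [if_neg hc]
      symm
      apply List.filter_eq_self.mpr
      intro q hq
      have : q.1 ≠ key := by
        intro h
        apply hc
        apply (PySem.Dict.contains_iff_mem_keys v key).mpr
        rw [hkeys]
        exact h ▸ List.mem_map_of_mem hq
      simpa using this
  rw [hmain, ofList_of_nodup_fst _ ((hkeys ▸ hnd).sublist (List.Sublist.map _ List.filter_sublist))]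
  rfl

-- ===== VERDICT (by name: the statement is the Claim_ definition above) =====
theorem remove_query_from_ranked_list_spec : Claim_equal_remove_query_from_ranked_list := by
  intro dpr_dict _
  unfold Spec_remove_query_from_ranked_list
  unfold remove_query_from_ranked_list remove_query_from_ranked_list_alt
  simp only
  congr 1
  apply congrArg
  apply PySem.List.foldl_congr_mem
  intro acc kv _
  rw [inner_loop_insert, filter_fold_eq_erase _ _ (PySem.Dict.nodup_keys_ofList _)]
  rw [splice_eq_erase _ _ (PySem.Dict.nodup_keys_ofList _)]
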